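-- pv_equiv track=rewrite | github.com/pirateantalis-cyber/hunter-sim | Validator/validate_builds.py | parse_issue_body
-- ===== SOURCE A (Python) =====
-- from typing import Optional, Dict, List, Tuple
--
-- def parse_issue_body(body: str) -> Dict[str, str]:
--     """Parse GitHub issue body into field dictionary."""
--     fields = {}
--     current_field = None
--     current_value = []
--
--     for line in body.split('\n'):
--         # Check for field headers (### Field Name)
--         if line.startswith('### '):
--             if current_field:
--                 fields[current_field] = '\n'.join(current_value).strip()
--             current_field = line[4:].strip()
--             current_value = []
--         elif current_field:
--             current_value.append(line)
--
--     if current_field: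
--         fields[current_field] = '\n'.join(current_value).strip()
--
--     return fields
-- ===== SOURCE B (Python) =====
-- def _skip_to_header(lines):
--     while lines and not lines[0].startswith('### '):
--         lines = lines[1:]
--     return lines
--
--
-- def _take_until_header(lines):
--     taken = []
--     for l in lines:
--         if l.startswith('### '):
--             break
--         taken.append(l)
--     return taken
--
--
-- def parse_issue_body(body: str) -> dict:
--     """Parse GitHub issue body into field dictionary (section-at-a-time)."""
--     fields = {}
--     rest = _skip_to_header(body.split('\n'))
--     while rest:
--         header, rest = rest[0], rest[1:]
--         name = header[4:].strip()
--         value_lines = _take_until_header(rest)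
--         rest = rest[len(value_lines):]
--         if name:
--             fields[name] = '\n'.join(value_lines).strip()
--     return fields
-- ===== Notes on version B (the rewrite author's own statement) =====
-- stated objective: alternative
-- what changed: B parses section-at-a-time: it skips the preamble before the first field header, then for each header takes the whole block of following value lines at once, instead of A's line-at-a-time loop with a mutable current-field/current-value accumulator and deferred flushes.
import Mathlib
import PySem

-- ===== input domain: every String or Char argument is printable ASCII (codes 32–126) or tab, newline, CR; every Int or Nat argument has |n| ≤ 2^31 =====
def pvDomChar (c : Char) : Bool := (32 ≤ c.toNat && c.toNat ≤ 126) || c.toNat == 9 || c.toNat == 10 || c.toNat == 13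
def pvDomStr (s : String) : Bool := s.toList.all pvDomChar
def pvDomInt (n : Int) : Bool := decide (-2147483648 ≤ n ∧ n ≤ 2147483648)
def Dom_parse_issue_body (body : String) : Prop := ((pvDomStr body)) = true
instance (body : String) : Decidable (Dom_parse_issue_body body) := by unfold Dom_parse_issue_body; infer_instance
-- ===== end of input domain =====

-- B parses section-at-a-time (skip preamble, then take each header and its block of value
-- lines) instead of A's line-at-a-time accumulator with deferred flushes; objective: alternative.

-- ===== PORT A =====
-- Python truthiness of current_field (None or str): None and "" are falsy
def pvTruthy : Option String → Bool
  | none => false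
  | some f => f ≠ ""

-- one loop iteration of A: state = (fields, current_field, current_value)
def pvStepA (st : PySem.Dict String String × Option String × List String) (line : String) :
    PySem.Dict String String × Option String × List String :=
  if PySem.Str.startswith line "### " then
    let fields :=
      if pvTruthy st.2.1 then
        st.1.insert (st.2.1.getD "") (PySem.Str.strip (PySem.Str.join "\n" st.2.2))
      else st.1
    (fields, some (PySem.Str.strip (PySem.Str.slice line (some 4) none)), [])
  else if pvTruthy st.2.1 then (st.1, st.2.1, st.2.2 ++ [line])
  else st

-- the final 'if current_field: fields[current_field] = ...'
def pvFlushA (st : PySem.Dict String String × Option String × List String) :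
    PySem.Dict String String :=
  if pvTruthy st.2.1 then
    st.1.insert (st.2.1.getD "") (PySem.Str.strip (PySem.Str.join "\n" st.2.2))
  else st.1

-- body.split('\n') (sep nonempty): exact via PySem.Chars.splitOn on the code points
def pvSplitNL (body : String) : List String :=
  (PySem.Chars.splitOn body.toList ['\n']).map String.ofList

def parse_issue_body (body : String) : List (String × String) :=
  (pvFlushA ((pvSplitNL body).foldl pvStepA (PySem.Dict.empty, none, []))).items

-- ===== PORT B =====
def pvSkipToHeader : List String → List String
  | [] => []
  | l :: t => if PySem.Str.startswith l "### " then l :: t else pvSkipToHeader t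

def pvTakeUntilHeader : List String → List String
  | [] => []
  | l :: t => if PySem.Str.startswith l "### " then [] else l :: pvTakeUntilHeader t

lemma pvTakeUntilHeader_length_le (t : List String) :
    (pvTakeUntilHeader t).length ≤ t.length := by
  induction t with
  | nil => simp [pvTakeUntilHeader]
  | cons l t ih =>
      simp only [pvTakeUntilHeader]
      split <;> simp [ih]

def pvSections (fields : PySem.Dict String String) : List String → PySem.Dict String String
  | [] => fields
  | header :: rest =>
      let name := PySem.Str.strip (PySem.Str.slice header (some 4) none)
      let valueLines := pvTakeUntilHeader rest
      let rest' := rest.drop valueLines.length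
      pvSections
        (if name ≠ "" then
          fields.insert name (PySem.Str.strip (PySem.Str.join "\n" valueLines))
        else fields) rest'
  termination_by ls => ls.length
  decreasing_by
    have := pvTakeUntilHeader_length_le rest
    simp only [List.length_drop, List.length_cons]
    omega

def parse_issue_body_alt (body : String) : List (String × String) :=
  (pvSections PySem.Dict.empty (pvSkipToHeader (pvSplitNL body))).items

-- ===== PRECONDITION & SPEC =====
def Spec_parse_issue_body (body : String) (out : List (String × String)) : Prop := out = parse_issue_body_alt body
instance (body : String) (out : List (String × String)) : Decidable (Spec_parse_issue_body body out) := by unfold Spec_parse_issue_body; infer_instance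

-- ===== CLAIM (what is proved, stated in full; the proofs are below) =====
def Claim_equal_parse_issue_body : Prop := ∀ (body : String), Dom_parse_issue_body body → Spec_parse_issue_body body (parse_issue_body body)

-- ===== LEMMAS AND PROOFS =====

lemma pv_drop_takeUntil (t : List String) :
    t.drop (pvTakeUntilHeader t).length = pvSkipToHeader t := by
  induction t with
  | nil => simp [pvTakeUntilHeader, pvSkipToHeader]
  | cons l t ih =>
      simp only [pvTakeUntilHeader, pvSkipToHeader]
      split <;> simp [ih]

lemma pvSections_nil (d : PySem.Dict String String) : pvSections d [] = d := by
  rw [pvSections]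

lemma pvSections_cons (d : PySem.Dict String String) (h : String) (t : List String) :
    pvSections d (h :: t) =
      pvSections
        (if PySem.Str.strip (PySem.Str.slice h (some 4) none) ≠ "" then
          d.insert (PySem.Str.strip (PySem.Str.slice h (some 4) none))
            (PySem.Str.strip (PySem.Str.join "\n" (pvTakeUntilHeader t)))
        else d) (pvSkipToHeader t) := by
  rw [pvSections]
  simp only [pv_drop_takeUntil]

-- A's loop from any state, followed by the final flush, equals B's section recursion.
lemma pv_main (ls : List String) (d : PySem.Dict String String)
    (cur : Option String) (acc : List String) :
    pvFlushA (ls.foldl pvStepA (d, cur, acc)) =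
      (if pvTruthy cur then
        pvSections
          (d.insert (cur.getD "")
            (PySem.Str.strip (PySem.Str.join "\n" (acc ++ pvTakeUntilHeader ls))))
          (pvSkipToHeader ls)
      else pvSections d (pvSkipToHeader ls)) := by
  induction ls generalizing d cur acc with
  | nil =>
      simp only [List.foldl_nil, pvFlushA, pvTakeUntilHeader, pvSkipToHeader,
        List.append_nil, pvSections_nil]
  | cons l t ih =>
      simp only [List.foldl_cons, pvTakeUntilHeader, pvSkipToHeader]
      by_cases hl : PySem.Str.startswith l "### " = true
      · -- header line: A flushes the pending section, B starts a new section here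
        rw [if_pos hl, if_pos hl]
        have hstep : pvStepA (d, cur, acc) l =
            (pvFlushA (d, cur, acc),
              some (PySem.Str.strip (PySem.Str.slice l (some 4) none)), []) := by
          simp only [pvStepA, hl, ite_true, pvFlushA]
        rw [hstep, ih]
        have hrhs :
            (if pvTruthy cur then
              pvSections
                (d.insert (cur.getD "")
                  (PySem.Str.strip (PySem.Str.join "\n" (acc ++ []))))
                (l :: t)
            else pvSections d (l :: t)) =
              pvSections (pvFlushA (d, cur, acc)) (l :: t) := by
          unfold pvFlushA
          split <;> simp
        rw [hrhs, pvSections_cons]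
        by_cases hn : PySem.Str.strip (PySem.Str.slice l (some 4) none) = ""
        · rw [if_neg (by simp [pvTruthy, hn]), if_neg (by simp [hn])]
        · rw [if_pos (by simp [pvTruthy, hn]), if_pos (by simp [hn])]
          simp
      · -- non-header line: A appends to the pending value (when a field is open)
        rw [if_neg hl, if_neg hl]
        have hstep : pvStepA (d, cur, acc) l =
            (if pvTruthy cur then (d, cur, acc ++ [l]) else (d, cur, acc)) := by
          simp only [pvStepA, hl, ite_false, Bool.false_eq_true, if_false]
        rw [hstep]
        by_cases hc : pvTruthy cur
        · rw [if_pos hc, ih, if_pos hc, if_pos hc]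
          simp
        · rw [if_neg hc, ih, if_neg hc, if_neg hc]

-- ===== VERDICT (by name: the statement is the Claim_ definition above) =====
theorem parse_issue_body_spec : Claim_equal_parse_issue_body := by
  intro body _
  unfold Spec_parse_issue_body parse_issue_body parse_issue_body_alt
  rw [pv_main]
  simp [pvTruthy]
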